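-- pv_equiv track=rewrite | github.com/superuser789/surveytools | agrisurvey.py | splitAlpnaNum
-- ===== SOURCE A (Python) =====
-- def splitAlpnaNum(sps):
--     divlist=[]; tstr=''
--     for sp in sps:
--         if not sp.isdigit(): # There is alphabet
--             divlist.append(tstr) # Add previous numbers
--             divlist.append(sp) # Add Current alphabet
--             tstr='' # Reset the no.
--         else:
--             tstr+=sp
--     divlist.append(tstr)
--     return [ i for i in divlist if i ]
-- ===== SOURCE B (Python) =====
-- def splitAlpnaNum(sps):
--     out = []
--     i = 0
--     n = len(sps)
--     while i < n:
--         if sps[i].isdigit():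
--             j = i
--             while j < n and sps[j].isdigit():
--                 j += 1
--             out.append(sps[i:j])
--             i = j
--         else:
--             out.append(sps[i])
--             i += 1
--     return out
-- ===== Notes on version B (the rewrite author's own statement) =====
-- stated objective: idiomatic
-- what changed: Replaces A's pending-digit accumulator with post-hoc filtering of empty strings by a single index-based run scanner that emits each maximal digit run (via an inner while + slice) and each non-digit character directly, never creating empties.
import Mathlib
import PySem

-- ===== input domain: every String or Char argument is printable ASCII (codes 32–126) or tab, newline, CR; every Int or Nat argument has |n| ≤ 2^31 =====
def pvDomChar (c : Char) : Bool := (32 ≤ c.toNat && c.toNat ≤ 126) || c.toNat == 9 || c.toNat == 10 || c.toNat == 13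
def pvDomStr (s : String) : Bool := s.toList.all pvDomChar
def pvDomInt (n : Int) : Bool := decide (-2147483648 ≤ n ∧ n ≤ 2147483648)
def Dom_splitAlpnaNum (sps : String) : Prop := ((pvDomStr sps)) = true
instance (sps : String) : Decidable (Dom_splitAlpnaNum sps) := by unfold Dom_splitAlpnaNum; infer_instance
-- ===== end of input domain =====

-- B replaces A's pending-digit accumulator plus post-hoc empty filter with a single
-- run-scanner that emits each maximal digit run (and each non-digit character) directly
-- (objective: idiomatic; same O(n) cost). Return value only; neither version mutates its input.

-- ===== PORT A =====
-- tstr is carried as List Char ('' = [], tstr += sp = t ++ [sp]); String.ofList rebuilds the Python str.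
def pvStepA (p : List String × List Char) (sp : Char) : List String × List Char :=
  if ¬ PySem.Chars.isdigit sp then
    (p.1 ++ [String.ofList p.2, String.ofList [sp]], [])   -- append previous numbers, then current char
  else
    (p.1, p.2 ++ [sp])                                     -- tstr += sp

def splitAlpnaNum (sps : String) : List String :=
  let r := sps.toList.foldl pvStepA ([], [])
  (r.1 ++ [String.ofList r.2]).filter (fun i => i ≠ "")    -- [ i for i in divlist if i ]

-- ===== PORT B =====
-- the outer while loop; the inner 'while j < n and sps[j].isdigit(): j += 1' and sps[i:j]
-- are the takeWhile/dropWhile pair on the remaining characters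
def pvRuns : List Char → List String
  | [] => []
  | c :: rest =>
    if PySem.Chars.isdigit c then
      String.ofList ((c :: rest).takeWhile PySem.Chars.isdigit)
        :: pvRuns ((c :: rest).dropWhile PySem.Chars.isdigit)
    else
      String.ofList [c] :: pvRuns rest
termination_by cs => cs.length
decreasing_by
  · simp_all
    exact List.length_dropWhile_le _ _
  · simp

def splitAlpnaNum_alt (sps : String) : List String := pvRuns sps.toList

-- ===== PRECONDITION & SPEC =====
def Spec_splitAlpnaNum (sps : String) (out : List String) : Prop := out = splitAlpnaNum_alt sps
instance (sps : String) (out : List String) : Decidable (Spec_splitAlpnaNum sps out) := by unfold Spec_splitAlpnaNum; infer_instance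

-- ===== CLAIM (what is proved, stated in full; the proofs are below) =====
def Claim_equal_splitAlpnaNum : Prop := ∀ (sps : String), Dom_splitAlpnaNum sps → Spec_splitAlpnaNum sps (splitAlpnaNum sps)

-- ===== LEMMAS AND PROOFS =====

theorem pvOfList_eq_empty (l : List Char) : (String.ofList l = "") ↔ l = [] := by
  constructor
  · intro h
    have := congrArg String.toList h
    simpa using this
  · intro h; simp [h]

-- how A's loop body acts on the state, by branch
theorem pvStepA_digit (dl : List String) (t : List Char) (c : Char)
    (h : PySem.Chars.isdigit c = true) : pvStepA (dl, t) c = (dl, t ++ [c]) := by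
  simp [pvStepA, h]

theorem pvStepA_nondigit (dl : List String) (t : List Char) (c : Char)
    (h : ¬ PySem.Chars.isdigit c = true) :
    pvStepA (dl, t) c = (dl ++ [String.ofList t, String.ofList [c]], []) := by
  simp [pvStepA, h]

-- A's loop body only ever appends to divlist, so the divlist prefix factors out of the fold
theorem pvFoldA_shift (cs : List Char) (dl : List String) (t : List Char) :
    cs.foldl pvStepA (dl, t)
      = (dl ++ (cs.foldl pvStepA ([], t)).1, (cs.foldl pvStepA ([], t)).2) := by
  induction cs generalizing dl t with
  | nil => simp
  | cons c cs ih =>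
    by_cases h : PySem.Chars.isdigit c
    · simp only [List.foldl_cons, pvStepA_digit _ _ _ h]
      exact ih dl (t ++ [c])
    · simp only [List.foldl_cons, pvStepA_nondigit _ _ _ h]
      rw [ih (dl ++ [String.ofList t, String.ofList [c]]) [],
          ih ([] ++ [String.ofList t, String.ofList [c]]) []]
      simp

-- A's result from pending digits t and remaining input cs
def pvG (cs : List Char) (t : List Char) : List String :=
  let r := cs.foldl pvStepA ([], t)
  (r.1 ++ [String.ofList r.2]).filter (fun i => i ≠ "")

-- unfolding pvRuns one step, by branch
theorem pvRuns_cons_digit (c : Char) (cs : List Char) (h : PySem.Chars.isdigit c = true) :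
    pvRuns (c :: cs)
      = String.ofList ((c :: cs).takeWhile PySem.Chars.isdigit)
          :: pvRuns ((c :: cs).dropWhile PySem.Chars.isdigit) := by
  rw [pvRuns]; simp [h]

theorem pvRuns_cons_nondigit (c : Char) (cs : List Char) (h : ¬ PySem.Chars.isdigit c = true) :
    pvRuns (c :: cs) = String.ofList [c] :: pvRuns cs := by
  rw [pvRuns.eq_def]
  simp [h]

-- pvRuns merges a leading digit run into one element
theorem pvRuns_run (cs : List Char) :
    pvRuns cs
      = (if cs.takeWhile PySem.Chars.isdigit = [] then []
          else [String.ofList (cs.takeWhile PySem.Chars.isdigit)])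
        ++ pvRuns (cs.dropWhile PySem.Chars.isdigit) := by
  cases cs with
  | nil => simp [pvRuns]
  | cons c cs =>
    by_cases h : PySem.Chars.isdigit c
    · rw [pvRuns_cons_digit c cs h]
      simp [h, List.takeWhile_cons, List.dropWhile_cons]
    · simp [h, List.takeWhile_cons, List.dropWhile_cons, pvRuns_cons_nondigit c cs h]

-- main invariant: A's remaining computation = pending digits merged with B's runs
theorem pvG_eq (cs : List Char) (t : List Char) :
    pvG cs t
      = (if t ++ cs.takeWhile PySem.Chars.isdigit = [] then []
          else [String.ofList (t ++ cs.takeWhile PySem.Chars.isdigit)])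
        ++ pvRuns (cs.dropWhile PySem.Chars.isdigit) := by
  induction cs generalizing t with
  | nil =>
    simp only [pvG, List.foldl_nil, List.takeWhile_nil, List.dropWhile_nil, List.append_nil,
      pvRuns]
    by_cases h : t = []
    · simp [h, List.filter, pvOfList_eq_empty]
    · simp [List.filter, pvOfList_eq_empty, h]
  | cons c cs ih =>
    by_cases h : PySem.Chars.isdigit c
    · have hstep : pvG (c :: cs) t = pvG cs (t ++ [c]) := by
        simp only [pvG, List.foldl_cons, pvStepA_digit _ _ _ h]
      rw [hstep, ih (t ++ [c])]
      simp [h, List.takeWhile_cons, List.dropWhile_cons]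
    · have hstep : pvG (c :: cs) t
          = ((if t = [] then [] else [String.ofList t]) ++ [String.ofList [c]]) ++ pvG cs [] := by
        simp only [pvG, List.foldl_cons, pvStepA_nondigit _ _ _ h]
        simp only [List.nil_append]
        rw [pvFoldA_shift cs [String.ofList t, String.ofList [c]] []]
        simp only [List.append_assoc, List.filter_append]
        by_cases ht : t = []
        · simp [ht, List.filter, pvOfList_eq_empty]
        · simp [List.filter, pvOfList_eq_empty, ht]
      rw [hstep, ih [], List.nil_append, ← pvRuns_run cs]
      simp [h, List.takeWhile_cons, List.dropWhile_cons, pvRuns_cons_nondigit c cs h,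
        List.append_assoc]

-- ===== VERDICT (by name: the statement is the Claim_ definition above) =====
theorem splitAlpnaNum_spec : Claim_equal_splitAlpnaNum := by
  intro sps _
  show splitAlpnaNum sps = splitAlpnaNum_alt sps
  have h1 : splitAlpnaNum sps = pvG sps.toList [] := rfl
  rw [h1, pvG_eq, List.nil_append, ← pvRuns_run]
  rfl
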